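-- pv_equiv track=rewrite | github.com/iayoung85/2ndsandbox | upgrading rand group finder.py | makealltriplets
-- ===== SOURCE A (Python) =====
-- def makealltriplets(anylist):
--     listoftrips=[]
--     for n in range(len(anylist)):
--         for m in range(len(anylist)):
--             for l in range(len(anylist)):
--                 if n!=m and n!=l and m!=l and [anylist[n],anylist[m],anylist[l]] not in listoftrips and [anylist[l],anylist[n],anylist[m]] not in listoftrips and [anylist[m],anylist[l],anylist[n]] not in listoftrips and [anylist[n],anylist[l],anylist[m]] not in listoftrips and [anylist[m],anylist[n],anylist[l]] not in listoftrips and [anylist[l],anylist[m],anylist[n]] not in listoftrips: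
--                     listoftrips.append([anylist[n],anylist[m],anylist[l]])
--     return listoftrips
-- ===== SOURCE B (Python) =====
-- def makealltriplets(anylist):
--     result = []
--     seen = set()
--     n = len(anylist)
--     for i in range(n):
--         for j in range(i + 1, n):
--             for k in range(j + 1, n):
--                 skey = tuple(sorted((anylist[i], anylist[j], anylist[k])))
--                 if skey not in seen:
--                     seen.add(skey)
--                     result.append([anylist[i], anylist[j], anylist[k]])
--     return result
-- ===== Notes on version B (the rewrite author's own statement) =====
-- stated objective: faster
-- what changed: Replace the O(n^3)-iteration-with-six-linear-list-membership-tests over all ordered index triples by a single pass over ascending index combinations i<j<k deduplicated via a hash set of sorted value tuples.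
import Mathlib
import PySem

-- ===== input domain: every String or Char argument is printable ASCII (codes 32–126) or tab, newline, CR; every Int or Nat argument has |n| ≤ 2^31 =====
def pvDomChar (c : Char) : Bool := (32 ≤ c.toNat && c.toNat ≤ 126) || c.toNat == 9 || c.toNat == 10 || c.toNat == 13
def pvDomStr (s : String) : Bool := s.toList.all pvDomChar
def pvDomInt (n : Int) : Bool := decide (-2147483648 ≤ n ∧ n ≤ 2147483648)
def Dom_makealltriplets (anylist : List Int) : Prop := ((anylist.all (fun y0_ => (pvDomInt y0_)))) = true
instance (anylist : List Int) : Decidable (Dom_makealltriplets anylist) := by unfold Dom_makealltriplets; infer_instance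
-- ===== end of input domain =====

-- B replaces A's scan of all ordered index triples with six linear membership tests by a single
-- pass over ascending index combinations i<j<k deduplicated via a set of sorted value triples
-- (objective: faster; Python B keys the set by tuple(sorted(...)) only for hashability — the
-- port keeps the sorted list itself as the key, the same data).

-- ===== PORT A =====
def makealltriplets (anylist : List Int) : List (List Int) :=
  (PySem.List.pyRange 0 anylist.length 1).foldl (fun listoftrips n =>
    (PySem.List.pyRange 0 anylist.length 1).foldl (fun listoftrips m =>
      (PySem.List.pyRange 0 anylist.length 1).foldl (fun listoftrips l =>
        if n ≠ m ∧ n ≠ l ∧ m ≠ l ∧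
            [PySem.List.pyGetD anylist n 0, PySem.List.pyGetD anylist m 0, PySem.List.pyGetD anylist l 0] ∉ listoftrips ∧
            [PySem.List.pyGetD anylist l 0, PySem.List.pyGetD anylist n 0, PySem.List.pyGetD anylist m 0] ∉ listoftrips ∧
            [PySem.List.pyGetD anylist m 0, PySem.List.pyGetD anylist l 0, PySem.List.pyGetD anylist n 0] ∉ listoftrips ∧
            [PySem.List.pyGetD anylist n 0, PySem.List.pyGetD anylist l 0, PySem.List.pyGetD anylist m 0] ∉ listoftrips ∧
            [PySem.List.pyGetD anylist m 0, PySem.List.pyGetD anylist n 0, PySem.List.pyGetD anylist l 0] ∉ listoftrips ∧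
            [PySem.List.pyGetD anylist l 0, PySem.List.pyGetD anylist m 0, PySem.List.pyGetD anylist n 0] ∉ listoftrips
        then listoftrips ++ [[PySem.List.pyGetD anylist n 0, PySem.List.pyGetD anylist m 0, PySem.List.pyGetD anylist l 0]]
        else listoftrips) listoftrips) listoftrips) []

-- ===== PORT B =====
def makealltriplets_alt (anylist : List Int) : List (List Int) :=
  ((PySem.List.pyRange 0 anylist.length 1).foldl (fun st i =>
    (PySem.List.pyRange (i + 1) anylist.length 1).foldl (fun st j =>
      (PySem.List.pyRange (j + 1) anylist.length 1).foldl (fun st k =>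
        let skey := PySem.List.sorted
          [PySem.List.pyGetD anylist i 0, PySem.List.pyGetD anylist j 0, PySem.List.pyGetD anylist k 0]
          (fun x => x) false
        if skey ∉ st.2 then
          (st.1 ++ [[PySem.List.pyGetD anylist i 0, PySem.List.pyGetD anylist j 0, PySem.List.pyGetD anylist k 0]],
           PySem.Set.add st.2 skey)
        else st) st) st)
    (([] : List (List Int)), (PySem.Set.empty : PySem.Set (List Int)))).1

-- ===== PRECONDITION & SPEC =====
def Spec_makealltriplets (anylist : List Int) (out : List (List Int)) : Prop := out = makealltriplets_alt anylist
instance (anylist : List Int) (out : List (List Int)) : Decidable (Spec_makealltriplets anylist out) := by unfold Spec_makealltriplets; infer_instance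

-- ===== CLAIM (what is proved, stated in full; the proofs are below) =====
def Claim_equal_makealltriplets : Prop := ∀ (anylist : List Int), Dom_makealltriplets anylist → Spec_makealltriplets anylist (makealltriplets anylist)

-- ===== LEMMAS AND PROOFS =====

-- value at an index (all indices used are in range, so the default is never hit)
def pvA (a : List Int) (i : Int) : Int := PySem.List.pyGetD a i 0

-- the value triple at an index triple
def pvVals (a : List Int) (c : Int × Int × Int) : List Int := [pvA a c.1, pvA a c.2.1, pvA a c.2.2]

-- Python sorted() of a value triple — B's dedup key
def ksort (t : List Int) : List Int := PySem.List.sorted t (fun x => x) false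

def pvDist (c : Int × Int × Int) : Prop := c.1 ≠ c.2.1 ∧ c.1 ≠ c.2.2 ∧ c.2.1 ≠ c.2.2

def pvAsc (c : Int × Int × Int) : Bool := decide (c.1 < c.2.1) && decide (c.2.1 < c.2.2)

def pvLex (c d : Int × Int × Int) : Prop :=
  c.1 < d.1 ∨ (c.1 = d.1 ∧ (c.2.1 < d.2.1 ∨ (c.2.1 = d.2.1 ∧ c.2.2 < d.2.2)))

def stepA (a : List Int) (L : List (List Int)) (c : Int × Int × Int) : List (List Int) :=
  match c with
  | (n, m, l) =>
    if n ≠ m ∧ n ≠ l ∧ m ≠ l ∧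
        [pvA a n, pvA a m, pvA a l] ∉ L ∧ [pvA a l, pvA a n, pvA a m] ∉ L ∧
        [pvA a m, pvA a l, pvA a n] ∉ L ∧ [pvA a n, pvA a l, pvA a m] ∉ L ∧
        [pvA a m, pvA a n, pvA a l] ∉ L ∧ [pvA a l, pvA a m, pvA a n] ∉ L
    then L ++ [[pvA a n, pvA a m, pvA a l]] else L

def stepB (a : List Int) (st : List (List Int) × PySem.Set (List Int)) (c : Int × Int × Int) :
    List (List Int) × PySem.Set (List Int) :=
  match c with
  | (i, j, k) =>
    if ksort [pvA a i, pvA a j, pvA a k] ∉ st.2 then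
      (st.1 ++ [[pvA a i, pvA a j, pvA a k]], PySem.Set.add st.2 (ksort [pvA a i, pvA a j, pvA a k]))
    else st

def cube (a : List Int) : List (Int × Int × Int) :=
  (PySem.List.pyRange 0 a.length 1).flatMap (fun n =>
    (PySem.List.pyRange 0 a.length 1).flatMap (fun m =>
      (PySem.List.pyRange 0 a.length 1).map (fun l => (n, m, l))))

def combos (a : List Int) : List (Int × Int × Int) :=
  (PySem.List.pyRange 0 a.length 1).flatMap (fun i =>
    (PySem.List.pyRange (i + 1) a.length 1).flatMap (fun j =>
      (PySem.List.pyRange (j + 1) a.length 1).map (fun k => (i, j, k))))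

-- state of B's loop after the prefix P of the traversal
def stB (a : List Int) (P : List (Int × Int × Int)) : List (List Int) × PySem.Set (List Int) :=
  (P.filter pvAsc).foldl (stepB a) ([], PySem.Set.empty)

theorem makealltriplets_eq_fold (a : List Int) : makealltriplets a = (cube a).foldl (stepA a) [] := by
  simp only [makealltriplets, cube, List.foldl_flatMap, List.foldl_map, stepA, pvA]

theorem makealltriplets_alt_eq_fold (a : List Int) :
    makealltriplets_alt a = ((combos a).foldl (stepB a) ([], PySem.Set.empty)).1 := by
  simp only [makealltriplets_alt, combos, List.foldl_flatMap, List.foldl_map, stepB, pvA, ksort]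

theorem pswap12 (p q r : Int) : ([q, p, r] : List Int).Perm [p, q, r] := List.Perm.swap p q [r]

theorem pswap23 (p q r : Int) : ([p, r, q] : List Int).Perm [p, q, r] := List.Perm.cons p (List.Perm.swap q r [])

theorem pcyc1 (x y z : Int) : ([z, x, y] : List Int).Perm [x, y, z] := (pswap12 x z y).trans (pswap23 x y z)

theorem pcyc2 (x y z : Int) : ([y, z, x] : List Int).Perm [x, y, z] := (pswap23 y x z).trans (pswap12 x y z)

theorem prev3 (x y z : Int) : ([z, y, x] : List Int).Perm [x, y, z] := (pswap12 y z x).trans (pcyc2 x y z)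

theorem perm2_cases {b c u v : Int} (h : ([b, c] : List Int).Perm [u, v]) :
    (b = u ∧ c = v) ∨ (b = v ∧ c = u) := by
  have hb : b ∈ ([u, v] : List Int) := h.mem_iff.mp (by simp)
  rcases (by simpa using hb : b = u ∨ b = v) with hbu | hbv
  · subst hbu
    have h1 : ([c] : List Int).Perm [v] := (List.perm_cons b).mp h
    left
    exact ⟨rfl, by simpa using List.perm_singleton.mp h1⟩
  · subst hbv
    have h2 : ([b, c] : List Int).Perm [b, u] := h.trans (List.Perm.swap b u [])
    right
    exact ⟨rfl, by simpa using List.perm_singleton.mp ((List.perm_cons b).mp h2)⟩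

theorem perm3_cases {t : List Int} {x y z : Int} (h : t.Perm [x, y, z]) :
    t = [x, y, z] ∨ t = [z, x, y] ∨ t = [y, z, x] ∨ t = [x, z, y] ∨ t = [y, x, z] ∨ t = [z, y, x] := by
  have hlen : t.length = 3 := by simpa using h.length_eq
  obtain ⟨a, b, c, rfl⟩ : ∃ a b c, t = [a, b, c] := by
    match t, hlen with
    | [a, b, c], _ => exact ⟨a, b, c, rfl⟩
  have ha : a ∈ ([x, y, z] : List Int) := h.mem_iff.mp (by simp)
  rcases (by simpa using ha : a = x ∨ a = y ∨ a = z) with hax | hay | haz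
  · subst hax
    rcases perm2_cases ((List.perm_cons a).mp h) with ⟨rfl, rfl⟩ | ⟨rfl, rfl⟩
    · exact Or.inl rfl
    · exact Or.inr (Or.inr (Or.inr (Or.inl rfl)))
  · subst hay
    have h2 : ([b, c] : List Int).Perm [x, z] :=
      (List.perm_cons a).mp (h.trans (pswap12 x a z).symm)
    rcases perm2_cases h2 with ⟨rfl, rfl⟩ | ⟨rfl, rfl⟩
    · exact Or.inr (Or.inr (Or.inr (Or.inr (Or.inl rfl))))
    · exact Or.inr (Or.inr (Or.inl rfl))
  · subst haz
    have h2 : ([b, c] : List Int).Perm [x, y] :=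
      (List.perm_cons a).mp (h.trans (pcyc1 x y a).symm)
    rcases perm2_cases h2 with ⟨rfl, rfl⟩ | ⟨rfl, rfl⟩
    · exact Or.inr (Or.inl rfl)
    · exact Or.inr (Or.inr (Or.inr (Or.inr (Or.inr rfl))))

-- A's six-way membership test, characterised through B's dedup key
theorem six_iff_key (L : List (List Int)) (x y z : Int) :
    ([x, y, z] ∈ L ∨ [z, x, y] ∈ L ∨ [y, z, x] ∈ L ∨ [x, z, y] ∈ L ∨ [y, x, z] ∈ L ∨ [z, y, x] ∈ L)
      ↔ ksort [x, y, z] ∈ L.map ksort := by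
  constructor
  · have key : ∀ t : List Int, t.Perm [x, y, z] → t ∈ L → ksort [x, y, z] ∈ L.map ksort := by
      intro t hp ht
      exact List.mem_map.mpr ⟨t, ht, by
        simpa [ksort] using (PySem.List.sorted_id_eq_sorted_id_iff_perm t [x, y, z]).mpr hp⟩
    rintro (h | h | h | h | h | h)
    · exact key _ (List.Perm.refl _) h
    · exact key _ (pcyc1 x y z) h
    · exact key _ (pcyc2 x y z) h
    · exact key _ (pswap23 x y z) h
    · exact key _ (pswap12 x y z) h
    · exact key _ (prev3 x y z) h
  · intro h
    obtain ⟨t, ht, he⟩ := List.mem_map.mp h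
    have hp : t.Perm [x, y, z] := by
      have := (PySem.List.sorted_id_eq_sorted_id_iff_perm t [x, y, z]).mp (by simpa [ksort] using he)
      exact this
    rcases perm3_cases hp with rfl | rfl | rfl | rfl | rfl | rfl
    · exact Or.inl ht
    · exact Or.inr (Or.inl ht)
    · exact Or.inr (Or.inr (Or.inl ht))
    · exact Or.inr (Or.inr (Or.inr (Or.inl ht)))
    · exact Or.inr (Or.inr (Or.inr (Or.inr (Or.inl ht))))
    · exact Or.inr (Or.inr (Or.inr (Or.inr (Or.inr ht))))

theorem mem_cube {a : List Int} {c : Int × Int × Int} :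
    c ∈ cube a ↔ (0 ≤ c.1 ∧ c.1 < a.length) ∧ (0 ≤ c.2.1 ∧ c.2.1 < a.length) ∧
      (0 ≤ c.2.2 ∧ c.2.2 < a.length) := by
  obtain ⟨n, m, l⟩ := c
  simp only [cube, List.mem_flatMap, List.mem_map, PySem.List.mem_pyRange_one]
  constructor
  · rintro ⟨n', ⟨h1, h2⟩, m', ⟨h3, h4⟩, l', ⟨h5, h6⟩, heq⟩
    obtain ⟨rfl, rfl, rfl⟩ : n' = n ∧ m' = m ∧ l' = l := by
      simpa [Prod.ext_iff] using heq
    exact ⟨⟨h1, h2⟩, ⟨h3, h4⟩, ⟨h5, h6⟩⟩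
  · rintro ⟨⟨h1, h2⟩, ⟨h3, h4⟩, ⟨h5, h6⟩⟩
    exact ⟨n, ⟨h1, h2⟩, m, ⟨h3, h4⟩, l, ⟨h5, h6⟩, rfl⟩

theorem pairwise_flatMap' {α β : Type} {R : β → β → Prop} {f : α → List β} {l : List α}
    (h1 : ∀ x ∈ l, (f x).Pairwise R)
    (h2 : l.Pairwise (fun p q => ∀ x ∈ f p, ∀ y ∈ f q, R x y)) :
    (l.flatMap f).Pairwise R := by
  rw [List.flatMap_def]
  exact List.pairwise_flatten.mpr ⟨by simpa using h1, List.pairwise_map.mpr h2⟩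

theorem pairwise_cube (a : List Int) : (cube a).Pairwise pvLex := by
  apply pairwise_flatMap'
  · intro n _
    apply pairwise_flatMap'
    · intro m _
      exact List.pairwise_map.mpr ((PySem.List.pairwise_lt_pyRange_one 0 a.length).imp
        (fun h => Or.inr ⟨rfl, Or.inr ⟨rfl, h⟩⟩))
    · apply (PySem.List.pairwise_lt_pyRange_one 0 a.length).imp
      intro m m' hmm' x hx y hy
      obtain ⟨l, _, rfl⟩ := List.mem_map.mp hx
      obtain ⟨l', _, rfl⟩ := List.mem_map.mp hy
      exact Or.inr ⟨rfl, Or.inl hmm'⟩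
  · apply (PySem.List.pairwise_lt_pyRange_one 0 a.length).imp
    intro n n' hnn' x hx y hy
    obtain ⟨m, _, x', hx', rfl⟩ := by simpa [List.mem_flatMap, List.mem_map] using hx
    obtain ⟨m', _, y', hy', rfl⟩ := by simpa [List.mem_flatMap, List.mem_map] using hy
    exact Or.inl hnn'

-- every distinct index triple has an ascending, lexicographically-no-larger rearrangement
theorem exists_asc (c : Int × Int × Int) (h : pvDist c) :
    ∃ c' : Int × Int × Int, pvAsc c' = true ∧
      ([c'.1, c'.2.1, c'.2.2] : List Int).Perm [c.1, c.2.1, c.2.2] ∧ (c' = c ∨ pvLex c' c) := by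
  obtain ⟨n, m, l⟩ := c
  obtain ⟨h1, h2, h3⟩ : n ≠ m ∧ n ≠ l ∧ m ≠ l := h
  rcases lt_or_gt_of_ne h1 with hnm | hmn
  · rcases lt_or_gt_of_ne h3 with hml | hlm
    · exact ⟨(n, m, l), by simp [pvAsc]; omega, List.Perm.refl _, Or.inl rfl⟩
    · rcases lt_or_gt_of_ne h2 with hnl | hln
      · exact ⟨(n, l, m), by simp [pvAsc]; omega, pswap23 n m l, Or.inr (by simp [pvLex]; omega)⟩
      · exact ⟨(l, n, m), by simp [pvAsc]; omega, pcyc1 n m l, Or.inr (by simp [pvLex]; omega)⟩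
  · rcases lt_or_gt_of_ne h2 with hnl | hln
    · exact ⟨(m, n, l), by simp [pvAsc]; omega, pswap12 n m l, Or.inr (by simp [pvLex]; omega)⟩
    · rcases lt_or_gt_of_ne h3 with hml | hlm
      · exact ⟨(m, l, n), by simp [pvAsc]; omega, pcyc2 n m l, Or.inr (by simp [pvLex]; omega)⟩
      · exact ⟨(l, m, n), by simp [pvAsc]; omega, prev3 n m l, Or.inr (by simp [pvLex]; omega)⟩

theorem stB_append_one (a : List Int) (P : List (Int × Int × Int)) (c : Int × Int × Int) :
    stB a (P ++ [c]) = if pvAsc c = true then stepB a (stB a P) c else stB a P := by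
  by_cases hc : pvAsc c = true
  · simp [stB, List.filter_append, hc, List.foldl_append]
  · simp [stB, List.filter_append, hc]

theorem main_inv (a : List Int) : ∀ (R P : List (Int × Int × Int)),
    cube a = P ++ R →
    (∀ u, u ∈ (stB a P).2 ↔ u ∈ ((stB a P).1.map ksort)) →
    (∀ u, u ∈ ((stB a P).1.map ksort) ↔ ∃ c ∈ P, pvDist c ∧ ksort (pvVals a c) = u) →
    R.foldl (stepA a) ((stB a P).1) = (stB a (P ++ R)).1 := by
  intro R
  induction R with
  | nil => intro P _ _ _; simp
  | cons c R ih =>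
    intro P hcube hI2 hI3
    obtain ⟨n, m, l⟩ := c
    have hc_mem : (n, m, l) ∈ cube a := by rw [hcube]; simp
    have hsix := six_iff_key ((stB a P).1) (pvA a n) (pvA a m) (pvA a l)
    have hmain : stepA a ((stB a P).1) (n, m, l) = (stB a (P ++ [(n, m, l)])).1 ∧
        (∀ u, u ∈ (stB a (P ++ [(n, m, l)])).2 ↔ u ∈ ((stB a (P ++ [(n, m, l)])).1.map ksort)) ∧
        (∀ u, u ∈ ((stB a (P ++ [(n, m, l)])).1.map ksort) ↔
          ∃ d ∈ P ++ [(n, m, l)], pvDist d ∧ ksort (pvVals a d) = u) := by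
      by_cases hDist : n ≠ m ∧ n ≠ l ∧ m ≠ l
      · by_cases hAsc : pvAsc (n, m, l) = true
        · -- ascending triple: A and B act in lock step
          by_cases hk : ksort [pvA a n, pvA a m, pvA a l] ∈ (stB a P).2
          · have hmap : ksort [pvA a n, pvA a m, pvA a l] ∈ ((stB a P).1.map ksort) :=
              (hI2 _).mp hk
            have hB : stB a (P ++ [(n, m, l)]) = stB a P := by
              rw [stB_append_one, if_pos hAsc]
              show (if ksort [pvA a n, pvA a m, pvA a l] ∉ (stB a P).2 then _ else stB a P) = _
              rw [if_neg (not_not_intro hk)]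
            have hA : stepA a ((stB a P).1) (n, m, l) = (stB a P).1 := by
              simp only [stepA]
              rw [if_neg]
              rintro ⟨-, -, -, h4, h5, h6, h7, h8, h9⟩
              rcases hsix.mpr hmap with h | h | h | h | h | h
              exacts [h4 h, h5 h, h6 h, h7 h, h8 h, h9 h]
            refine ⟨by rw [hA, hB], by rw [hB]; exact hI2, ?_⟩
            intro u
            rw [hB, hI3 u]
            constructor
            · rintro ⟨d, hd, hdd, hku⟩
              exact ⟨d, by simp [hd], hdd, hku⟩
            · rintro ⟨d, hd, hdd, hku⟩
              rcases (by simpa using hd : d ∈ P ∨ d = (n, m, l)) with h | rfl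
              · exact ⟨d, h, hdd, hku⟩
              · have hku' : ksort [pvA a n, pvA a m, pvA a l] = u := by
                  simpa [pvVals] using hku
                obtain ⟨d, hdP, hdd2, hke⟩ := (hI3 _).mp hmap
                exact ⟨d, hdP, hdd2, by rw [hke, hku']⟩
          · have hB : stB a (P ++ [(n, m, l)]) =
                ((stB a P).1 ++ [[pvA a n, pvA a m, pvA a l]],
                  PySem.Set.add ((stB a P).2) (ksort [pvA a n, pvA a m, pvA a l])) := by
              rw [stB_append_one, if_pos hAsc]
              show (if ksort [pvA a n, pvA a m, pvA a l] ∉ (stB a P).2 then _ else stB a P) = _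
              rw [if_pos hk]
            have hA : stepA a ((stB a P).1) (n, m, l) =
                (stB a P).1 ++ [[pvA a n, pvA a m, pvA a l]] := by
              simp only [stepA]
              rw [if_pos]
              exact ⟨hDist.1, hDist.2.1, hDist.2.2,
                fun hm => hk ((hI2 _).mpr (hsix.mp (Or.inl hm))),
                fun hm => hk ((hI2 _).mpr (hsix.mp (Or.inr (Or.inl hm)))),
                fun hm => hk ((hI2 _).mpr (hsix.mp (Or.inr (Or.inr (Or.inl hm))))),
                fun hm => hk ((hI2 _).mpr (hsix.mp (Or.inr (Or.inr (Or.inr (Or.inl hm)))))),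
                fun hm => hk ((hI2 _).mpr (hsix.mp (Or.inr (Or.inr (Or.inr (Or.inr (Or.inl hm))))))),
                fun hm => hk ((hI2 _).mpr (hsix.mp (Or.inr (Or.inr (Or.inr (Or.inr (Or.inr hm)))))))⟩
            refine ⟨by rw [hA, hB], ?_, ?_⟩
            · intro u
              rw [hB]
              show u ∈ PySem.Set.add _ _ ↔ _
              rw [PySem.Set.mem_add]
              simp only [List.map_append, List.map_cons, List.map_nil, List.mem_append,
                List.mem_singleton]
              rw [hI2 u]
            · intro u
              rw [hB]
              show u ∈ (((stB a P).1 ++ [[pvA a n, pvA a m, pvA a l]]).map ksort) ↔ _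
              simp only [List.map_append, List.map_cons, List.map_nil, List.mem_append,
                List.mem_singleton]
              rw [hI3 u]
              constructor
              · rintro (⟨d, hd, hdd, hku⟩ | rfl)
                · exact ⟨d, by simp [hd], hdd, hku⟩
                · exact ⟨(n, m, l), by simp, hDist, by simp [pvVals]⟩
              · rintro ⟨d, hd, hdd, hku⟩
                rcases (by simpa using hd : d ∈ P ∨ d = (n, m, l)) with h | rfl
                · exact Or.inl ⟨d, h, hdd, hku⟩
                · exact Or.inr (by simpa [pvVals] using hku.symm)
        · -- distinct but not ascending: the sorted companion was seen earlier
          obtain ⟨c', hasc', hp, hc'c⟩ := exists_asc (n, m, l) hDist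
          have hlex : pvLex c' (n, m, l) := by
            rcases hc'c with rfl | h
            · rw [hasc'] at hAsc; exact absurd rfl hAsc
            · exact h
          have hb : (0 ≤ n ∧ n < (a.length : Int)) ∧ (0 ≤ m ∧ m < (a.length : Int)) ∧
              (0 ≤ l ∧ l < (a.length : Int)) := mem_cube.mp hc_mem
          have h1m : c'.1 ∈ ([n, m, l] : List Int) := hp.mem_iff.mp (by simp)
          have h2m : c'.2.1 ∈ ([n, m, l] : List Int) := hp.mem_iff.mp (by simp)
          have h3m : c'.2.2 ∈ ([n, m, l] : List Int) := hp.mem_iff.mp (by simp)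
          have hc'cube : c' ∈ cube a := by
            refine mem_cube.mpr ⟨?_, ?_, ?_⟩
            · rcases (by simpa using h1m : c'.1 = n ∨ c'.1 = m ∨ c'.1 = l) with h | h | h <;>
                (rw [h]; omega)
            · rcases (by simpa using h2m : c'.2.1 = n ∨ c'.2.1 = m ∨ c'.2.1 = l) with h | h | h <;>
                (rw [h]; omega)
            · rcases (by simpa using h3m : c'.2.2 = n ∨ c'.2.2 = m ∨ c'.2.2 = l) with h | h | h <;>
                (rw [h]; omega)
          have hc'P : c' ∈ P := by
            have hpw := pairwise_cube a
            rw [hcube] at hpw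
            have hmem' : c' ∈ P ++ (n, m, l) :: R := by rw [← hcube]; exact hc'cube
            rcases List.mem_append.mp hmem' with h | h
            · exact h
            · rcases List.mem_cons.mp h with rfl | hR
              · rw [hasc'] at hAsc; exact absurd rfl hAsc
              · exfalso
                have hfwd : pvLex (n, m, l) c' :=
                  (List.pairwise_cons.mp (List.pairwise_append.mp hpw).2.1).1 c' hR
                simp only [pvLex] at hfwd hlex
                omega
          have hdist' : pvDist c' := by
            simp only [pvAsc, Bool.and_eq_true, decide_eq_true_eq] at hasc'
            exact ⟨by omega, by omega, by omega⟩
          have hkeyeq : ksort (pvVals a c') = ksort [pvA a n, pvA a m, pvA a l] := by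
            simp only [ksort]
            refine (PySem.List.sorted_id_eq_sorted_id_iff_perm _ _).mpr ?_
            have := hp.map (pvA a)
            simpa [pvVals] using this
          have hkey_mem : ksort [pvA a n, pvA a m, pvA a l] ∈ ((stB a P).1.map ksort) :=
            (hI3 _).mpr ⟨c', hc'P, hdist', hkeyeq⟩
          rw [stB_append_one, if_neg (by simp [hAsc])]
          refine ⟨?_, hI2, ?_⟩
          · simp only [stepA]
            rw [if_neg]
            rintro ⟨-, -, -, h4, h5, h6, h7, h8, h9⟩
            rcases hsix.mpr hkey_mem with h | h | h | h | h | h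
            exacts [h4 h, h5 h, h6 h, h7 h, h8 h, h9 h]
          · intro u
            rw [hI3 u]
            constructor
            · rintro ⟨d, hd, hdd, hku⟩
              exact ⟨d, by simp [hd], hdd, hku⟩
            · rintro ⟨d, hd, hdd, hku⟩
              rcases (by simpa using hd : d ∈ P ∨ d = (n, m, l)) with h | rfl
              · exact ⟨d, h, hdd, hku⟩
              · have hku' : ksort [pvA a n, pvA a m, pvA a l] = u := by
                  simpa [pvVals] using hku
                exact ⟨c', hc'P, hdist', by rw [hkeyeq, hku']⟩
      · -- repeated index: A skips, B never visits
        have hAsc : ¬ pvAsc (n, m, l) = true := by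
          simp only [ne_eq, not_and_or, not_not] at hDist
          simp only [pvAsc, Bool.and_eq_true, decide_eq_true_eq]
          omega
        rw [stB_append_one, if_neg hAsc]
        refine ⟨?_, hI2, ?_⟩
        · simp only [stepA]
          rw [if_neg]
          intro hcond
          exact hDist ⟨hcond.1, hcond.2.1, hcond.2.2.1⟩
        · intro u
          rw [hI3 u]
          constructor
          · rintro ⟨d, hd, hdd, hku⟩
            exact ⟨d, by simp [hd], hdd, hku⟩
          · rintro ⟨d, hd, hdd, hku⟩
            rcases (by simpa using hd : d ∈ P ∨ d = (n, m, l)) with h | rfl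
            · exact ⟨d, h, hdd, hku⟩
            · exact absurd hdd hDist
    obtain ⟨hstep, hI2', hI3'⟩ := hmain
    have hcube' : cube a = (P ++ [(n, m, l)]) ++ R := by
      rw [hcube]; simp
    have := ih (P ++ [(n, m, l)]) hcube' hI2' hI3'
    rw [List.foldl_cons, hstep, this]
    congr 1
    simp

theorem filter_pyRange (c b : Int) : ∀ (k : Nat) (a : Int), (b - a).toNat = k → a ≤ c + 1 →
    (PySem.List.pyRange a b 1).filter (fun x => decide (c < x)) = PySem.List.pyRange (c + 1) b 1 := by
  intro k
  induction k with
  | zero =>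
    intro a hk ha
    have hba : b ≤ a := by omega
    rw [PySem.List.pyRange_one_eq_nil hba, PySem.List.pyRange_one_eq_nil (by omega)]
    rfl
  | succ k ih =>
    intro a hk ha
    have hab : a < b := by omega
    rw [PySem.List.pyRange_one_cons hab]
    by_cases hca : c < a
    · have hac : a = c + 1 := by omega
      subst hac
      rw [← PySem.List.pyRange_one_cons hab]
      apply List.filter_eq_self.mpr
      intro x hx
      have := PySem.List.mem_pyRange_one.mp hx
      simp; omega
    · rw [List.filter_cons_of_neg (by simpa using hca)]
      exact ih (a + 1) (by omega) (by omega)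

theorem flatMap_if {α β : Type} (l : List α) (p : α → Bool) (f : α → List β) :
    (l.flatMap (fun x => if p x then f x else [])) = (l.filter p).flatMap f := by
  induction l with
  | nil => rfl
  | cons x xs ih =>
    by_cases hx : p x
    · simp [hx, ih]
    · simp [hx, ih]

theorem filter_cube (a : List Int) : (cube a).filter pvAsc = combos a := by
  rw [cube, combos, List.filter_flatMap]
  apply List.flatMap_congr
  intro n hn
  have hn0 : 0 ≤ n := (PySem.List.mem_pyRange_one.mp hn).1
  rw [List.filter_flatMap]
  have hstep : ∀ m : Int, ((PySem.List.pyRange 0 a.length 1).map (fun l => (n, m, l))).filter pvAsc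
      = if decide (n < m) then ((PySem.List.pyRange 0 a.length 1).filter
          (fun l => decide (m < l))).map (fun l => (n, m, l)) else [] := by
    intro m
    rw [List.filter_map]
    by_cases hnm : n < m
    · simp only [hnm, decide_true, if_true]
      congr 1
      apply List.filter_congr
      intro l _
      simp [pvAsc, hnm]
    · have : ((PySem.List.pyRange 0 a.length 1).filter (pvAsc ∘ fun l => (n, m, l))) = [] := by
        apply List.filter_eq_nil_iff.mpr
        intro l _
        simp [pvAsc, hnm]
      simp [this, hnm]
  calc ((PySem.List.pyRange 0 a.length 1).flatMap (fun m =>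
          ((PySem.List.pyRange 0 a.length 1).map (fun l => (n, m, l))).filter pvAsc))
      = (PySem.List.pyRange 0 a.length 1).flatMap (fun m =>
          if decide (n < m) then ((PySem.List.pyRange 0 a.length 1).filter
            (fun l => decide (m < l))).map (fun l => (n, m, l)) else []) :=
        List.flatMap_congr (fun m _ => hstep m)
    _ = ((PySem.List.pyRange 0 a.length 1).filter (fun m => decide (n < m))).flatMap (fun m =>
          ((PySem.List.pyRange 0 a.length 1).filter
            (fun l => decide (m < l))).map (fun l => (n, m, l))) := flatMap_if _ _ _
    _ = (PySem.List.pyRange (n + 1) a.length 1).flatMap (fun m =>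
          ((PySem.List.pyRange 0 a.length 1).filter
            (fun l => decide (m < l))).map (fun l => (n, m, l))) := by
        rw [filter_pyRange n a.length ((a.length : Int) - 0).toNat 0 rfl (by omega)]
    _ = (PySem.List.pyRange (n + 1) a.length 1).flatMap (fun m =>
          (PySem.List.pyRange (m + 1) a.length 1).map (fun l => (n, m, l))) := by
        apply List.flatMap_congr
        intro m hm
        have hm0 : 0 ≤ m := by
          have := PySem.List.mem_pyRange_one.mp hm; omega
        rw [filter_pyRange m a.length ((a.length : Int) - 0).toNat 0 rfl (by omega)]

-- ===== VERDICT (by name: the statement is the Claim_ definition above) =====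
theorem makealltriplets_spec : Claim_equal_makealltriplets := by
  intro a _
  unfold Spec_makealltriplets
  have h := main_inv a (cube a) [] (by simp) (by simp [stB, PySem.Set.empty]) (by simp [stB])
  simp only [stB, List.nil_append, List.filter_nil, List.foldl_nil] at h
  rw [makealltriplets_eq_fold, makealltriplets_alt_eq_fold, h, filter_cube]
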